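-- pv_equiv track=rewrite | github.com/mjun0328/Algorithm | 백준/Silver/1343. 폴리오미노/폴리오미노.py | solution
-- ===== SOURCE A (Python) =====
-- def solution(string):
--   arr = string.split('.')
--
--   for i in range(len(arr)):
--     length = len(arr[i])
--     if length % 2 > 0:
--       return -1
--
--     if length % 4 > 0:
--       string = 'A' * (length - 2) + 'BB'
--     else:
--       string = 'A' * length
--     arr[i] = string
--
--   return '.'.join(arr)
-- ===== SOURCE B (Python) =====
-- def solution(string):
--   out = ''
--   run = 0
--   for ch in string:
--     if ch == '.':
--       if run % 2:
--         return -1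
--       out += 'A' * run if run % 4 == 0 else 'A' * (run - 2) + 'BB'
--       out += '.'
--       run = 0
--     else:
--       run += 1
--   if run % 2:
--     return -1
--   return out + ('A' * run if run % 4 == 0 else 'A' * (run - 2) + 'BB')
-- ===== Notes on version B (the rewrite author's own statement) =====
-- stated objective: alternative
-- what changed: B replaces A's split/rewrite-each-segment/join pipeline by a single character scan that maintains a run-length counter and emits the output string directly, with no intermediate segment list.
-- outside the precondition, e.g. on solution('X'): A returns -1, B returns -1; on solution('XX.X'): A returns -1, B returns -1
import Mathlib
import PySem

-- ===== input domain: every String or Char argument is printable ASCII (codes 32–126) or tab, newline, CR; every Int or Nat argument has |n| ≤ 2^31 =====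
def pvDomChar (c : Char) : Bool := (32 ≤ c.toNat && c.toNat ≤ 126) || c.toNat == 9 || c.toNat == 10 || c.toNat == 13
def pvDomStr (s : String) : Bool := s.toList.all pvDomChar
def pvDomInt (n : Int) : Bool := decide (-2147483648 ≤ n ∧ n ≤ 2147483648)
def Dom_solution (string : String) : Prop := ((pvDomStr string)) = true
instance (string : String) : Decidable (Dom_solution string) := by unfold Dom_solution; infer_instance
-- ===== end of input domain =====

-- B replaces A's split/rewrite-each-segment/join pipeline by a single character scan with a
-- run-length counter that emits the output directly (objective: alternative; same O(n) cost).

-- ===== PORT A =====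
-- 'A' * n is List.replicate n 'A' (exact for the nonnegative lengths that occur here).
def patA (n : Nat) : List Char :=
  if n % 4 > 0 then List.replicate (n - 2) 'A' ++ ['B', 'B'] else List.replicate n 'A'

-- A's for-loop over arr: rewrite each element in order, return -1 (= none) on an odd length.
def loopA : List (List Char) → Option (List (List Char))
  | [] => some []
  | s :: rest =>
      if s.length % 2 > 0 then none
      else match loopA rest with
           | none => none
           | some r => some (patA s.length :: r)

def solution (string : String) : String :=
  match loopA (PySem.Chars.splitOn string.toList ['.']) with
  | none => "-1"                                -- Python returns -1 (an int, not a string) here; excluded by Pre_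
  | some arr' => String.ofList (PySem.Chars.join ['.'] arr')

-- ===== PORT B =====
def patB (n : Nat) : List Char :=
  if n % 4 == 0 then List.replicate n 'A' else List.replicate (n - 2) 'A' ++ ['B', 'B']

-- B's loop body: state = (output so far, current run length); none = Python's early 'return -1'.
def stepB : Option (List Char × Nat) → Char → Option (List Char × Nat)
  | none, _ => none
  | some (out, run), c =>
      if c == '.' then
        if run % 2 == 1 then none
        else some (out ++ patB run ++ ['.'], 0)
      else some (out, run + 1)

def solution_alt (string : String) : String :=
  match string.toList.foldl stepB (some ([], 0)) with
  | none => ""                                  -- Python returns -1 here; excluded by Pre_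
  | some (out, run) =>
      if run % 2 == 1 then ""                   -- Python returns -1 here; excluded by Pre_
      else String.ofList (out ++ patB run)

-- ===== PRECONDITION & SPEC =====
-- Pre_ excludes exactly the inputs in which some maximal segment between separators has odd
-- length: there Python A (and B) return the int -1, not a value of the declared String type.
def Pre_solution (string : String) : Prop :=
  ∀ s ∈ PySem.Chars.splitOn string.toList ['.'], s.length % 2 = 0
instance (string : String) : Decidable (Pre_solution string) := by unfold Pre_solution; infer_instance

def pvWitness_solution : String := "AA..AAAA.BB"

def Spec_solution (string : String) (out : String) : Prop := out = solution_alt string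
instance (string : String) (out : String) : Decidable (Spec_solution string out) := by unfold Spec_solution; infer_instance

-- ===== CLAIM (what is proved, stated in full; the proofs are below) =====
def Claim_equal_solution : Prop := ∀ (string : String), Dom_solution string → Pre_solution string → Spec_solution string (solution string)

-- ===== LEMMAS AND PROOFS =====

-- Proof-only reformulation of splitting on '.' (structural, fuel-free).
def splitDot : List Char → List (List Char)
  | [] => [[]]
  | c :: t =>
      if c = '.' then [] :: splitDot t
      else match splitDot t with
           | [] => [[c]]
           | h :: r => (c :: h) :: r

theorem splitDot_ne_nil (l : List Char) : splitDot l ≠ [] := by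
  cases l with
  | nil => simp [splitDot]
  | cons c t =>
      simp only [splitDot]
      split
      · simp
      · split <;> simp

-- prepend a prefix onto the head segment (the [cur] accumulator of splitOn.go)
def consHead (pre : List Char) : List (List Char) → List (List Char)
  | [] => [pre]
  | h :: t => (pre ++ h) :: t

theorem splitOn_go_eq (fuel : Nat) :
    ∀ (l cur : List Char) (acc : List (List Char)), l.length ≤ fuel →
      PySem.Chars.splitOn.go ['.'] fuel l cur acc
        = acc.reverse ++ consHead cur.reverse (splitDot l) := by
  induction fuel with
  | zero =>
      intro l cur acc h
      have hl : l = [] := by cases l <;> simp_all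
      subst hl
      simp [PySem.Chars.splitOn.go, splitDot, consHead]
  | succ n ih =>
      intro l cur acc h
      cases l with
      | nil => simp [PySem.Chars.splitOn.go, splitDot, consHead]
      | cons c rest =>
          by_cases hc : c = '.'
          · subst hc
            have hpre : List.isPrefixOf ['.'] ('.' :: rest) = true := by
              simp [List.isPrefixOf]
            rw [PySem.Chars.splitOn.go]
            simp only [hpre, if_true, List.length, List.drop]
            rw [ih rest [] (cur.reverse :: acc) (by simpa using Nat.le_of_succ_le_succ h)]
            have hne := splitDot_ne_nil rest
            cases hsd : splitDot rest with
            | nil => exact absurd hsd hne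
            | cons h' t' =>
                simp [splitDot, consHead, hsd]
          · have hpre : List.isPrefixOf ['.'] (c :: rest) = false := by
              simp [List.isPrefixOf]
              intro hEq; exact hc hEq.symm
            rw [PySem.Chars.splitOn.go]
            simp only [hpre, Bool.false_eq_true, if_false]
            rw [ih rest (c :: cur) acc (by simpa using Nat.le_of_succ_le_succ h)]
            have hne := splitDot_ne_nil rest
            cases hsd : splitDot rest with
            | nil => exact absurd hsd hne
            | cons h' t' =>
                simp [splitDot, consHead, hsd, hc]

theorem splitOn_eq_splitDot (l : List Char) :
    PySem.Chars.splitOn l ['.'] = splitDot l := by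
  unfold PySem.Chars.splitOn
  rw [splitOn_go_eq (l.length + 1) l [] [] (Nat.le_succ _)]
  have hne := splitDot_ne_nil l
  cases hsd : splitDot l with
  | nil => exact absurd hsd hne
  | cons h t => simp [consHead]

theorem patA_eq_patB (n : Nat) : patA n = patB n := by
  unfold patA patB
  by_cases h : n % 4 = 0
  · simp [h]
  · simp [h, Nat.pos_of_ne_zero h]

-- A's loop on segment lengths only (loopA depends only on the lengths).
def procL : List Nat → Option (List (List Char))
  | [] => some []
  | n :: t =>
      if n % 2 = 1 then none
      else match procL t with
           | none => none
           | some r => some (patA n :: r)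

theorem loopA_eq_procL (segs : List (List Char)) :
    loopA segs = procL (segs.map List.length) := by
  induction segs with
  | nil => rfl
  | cons s rest ih =>
      simp only [loopA, procL, List.map, ih]
      by_cases h : s.length % 2 = 1
      · have h' : s.length % 2 > 0 := by omega
        simp [h']
        omega
      · have h' : ¬ s.length % 2 > 0 := by omega
        simp [h, h']

theorem foldl_stepB_none (l : List Char) : l.foldl stepB none = none := by
  induction l with
  | nil => rfl
  | cons c t ih => simpa [stepB] using ih

theorem procL_ne_some_nil (ns : List Nat) (h : ns ≠ []) (r : List (List Char)) :
    procL ns = some r → r ≠ [] := by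
  cases ns with
  | nil => exact absurd rfl h
  | cons n t =>
      simp only [procL]
      split
      · intro h'; cases h'
      · split
        · intro h'; cases h'
        · intro h'; cases h'; simp

theorem procL_cons_even (run : Nat) (h : ¬ run % 2 = 1) (L : List Nat) :
    procL (run :: L) = (procL L).map (fun rr => patA run :: rr) := by
  simp only [procL, h, if_false]
  cases procL L <;> rfl

-- head-length adjustment: the pending run length joins the first segment
def addLen (run : Nat) : List Nat → List Nat
  | [] => [run]
  | n :: t => (run + n) :: t

-- B's fold, finished off, equals A's segment processing with the pending run folded into the head.
theorem foldB_eq (l : List Char) :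
    ∀ (out : List Char) (run : Nat),
      (match l.foldl stepB (some (out, run)) with
       | none => none
       | some (o, r) => if r % 2 = 1 then none else some (o ++ patB r))
        = (procL (addLen run ((splitDot l).map List.length))).map
            (fun segs => out ++ PySem.Chars.join ['.'] segs) := by
  induction l with
  | nil =>
      intro out run
      simp only [List.foldl, splitDot, List.map, addLen, procL]
      by_cases h : run % 2 = 1
      · simp [h]
      · simp [h, PySem.Chars.join_singleton, patA_eq_patB]
  | cons c t ih =>
      intro out run
      by_cases hc : c = '.'
      · subst hc
        simp only [List.foldl, stepB, beq_self_eq_true, if_true]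
        by_cases h : run % 2 = 1
        · have hb : (run % 2 == 1) = true := by simp [h]
          rw [hb]
          simp only [if_true, foldl_stepB_none]
          have hne := splitDot_ne_nil t
          cases hsd : splitDot t with
          | nil => exact absurd hsd hne
          | cons s r =>
              simp [splitDot, hsd, addLen, procL, h]
        · have hb : (run % 2 == 1) = false := by simp [h]
          rw [hb]
          simp only [Bool.false_eq_true, if_false]
          rw [ih (out ++ patB run ++ ['.']) 0]
          have hne := splitDot_ne_nil t
          cases hsd : splitDot t with
          | nil => exact absurd hsd hne
          | cons s r =>
              have hsp : splitDot ('.' :: t) = [] :: s :: r := by simp [splitDot, hsd]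
              rw [hsp]
              simp only [List.map, addLen, List.length_nil, Nat.add_zero, Nat.zero_add]
              rw [procL_cons_even run h]
              cases hp : procL (s.length :: List.map List.length r) with
              | none => simp
              | some segs =>
                  have hsegs := procL_ne_some_nil _ (by simp) _ hp
                  cases segs with
                  | nil => exact absurd rfl hsegs
                  | cons s0 sr =>
                      simp [patA_eq_patB, PySem.Chars.join_cons_cons]
      · have hcb : (c == '.') = false := by simp [hc]
        simp only [List.foldl, stepB, hcb, Bool.false_eq_true, if_false]
        rw [ih out (run + 1)]
        have hne := splitDot_ne_nil t
        cases hsd : splitDot t with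
        | nil => exact absurd hsd hne
        | cons s r =>
            simp only [splitDot, hc, if_false, hsd, List.map, addLen]
            have : run + 1 + s.length = run + (s.length + 1) := by omega
            simp [this]

theorem solution_alt_eq (string : String) :
    solution_alt string
      = match procL ((splitDot string.toList).map List.length) with
        | none => ""
        | some segs => String.ofList (PySem.Chars.join ['.'] segs) := by
  unfold solution_alt
  have h := foldB_eq string.toList [] 0
  have hne := splitDot_ne_nil string.toList
  cases hsd : splitDot string.toList with
  | nil => exact absurd hsd hne
  | cons s r =>
      rw [hsd] at h
      simp only [List.map, addLen, Nat.zero_add] at h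
      cases hf : string.toList.foldl stepB (some ([], 0)) with
      | none =>
          rw [hf] at h
          cases hp : procL (s.length :: r.map List.length) with
          | none => simp [hp]
          | some segs => rw [hp] at h; simp at h
      | some pr =>
          rw [hf] at h
          obtain ⟨o, rn⟩ := pr
          by_cases hr : rn % 2 = 1
          · simp only [hr, if_true] at h
            have hb : (rn % 2 = 1) := hr
            cases hp : procL (s.length :: r.map List.length) with
            | none => simp [hb, hp]
            | some segs => rw [hp] at h; simp at h
          · simp only [hr, if_false] at h
            cases hp : procL (s.length :: r.map List.length) with
            | none => rw [hp] at h; simp at h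
            | some segs =>
                rw [hp] at h
                simp only [Option.map_some, Option.some.injEq] at h
                simp [hr, hp, h]

theorem procL_total (ns : List Nat) (h : ∀ n ∈ ns, n % 2 = 0) :
    ∃ r, procL ns = some r := by
  induction ns with
  | nil => exact ⟨[], rfl⟩
  | cons n t ih =>
      obtain ⟨r, hr⟩ := ih (fun m hm => h m (List.mem_cons_of_mem _ hm))
      have hn : ¬ n % 2 = 1 := by have := h n (List.mem_cons_self) ; omega
      exact ⟨patA n :: r, by simp [procL, hn, hr]⟩

-- ===== VERDICT (by name: the statement is the Claim_ definition above) =====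
theorem solution_spec : Claim_equal_solution := by
  intro string _ hpre
  unfold Spec_solution solution
  rw [splitOn_eq_splitDot, loopA_eq_procL, solution_alt_eq]
  unfold Pre_solution at hpre
  rw [splitOn_eq_splitDot] at hpre
  obtain ⟨r, hr⟩ := procL_total ((splitDot string.toList).map List.length)
    (by intro n hn; obtain ⟨s, hs, rfl⟩ := List.mem_map.mp hn; exact hpre s hs)
  rw [hr]
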